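-- pv_equiv track=rewrite | github.com/shawnhuangyh/Python-Computing | Experiment 3/ex5.py | useall
-- ===== SOURCE A (Python) =====
-- def useall(word, allow):
--     allowword = set(i.lower() for i in allow)
--     lowerword = word.lower()
--     for i in lowerword:
--         if i in allowword:
--             allowword.remove(i)
--     if len(allowword) == 0:
--         return True
--     else:
--         return False
-- ===== SOURCE B (Python) =====
-- def useall(word, allow):
--     word_set = set(word.lower())
--     allow_set = {c.lower() for c in allow}
--     return allow_set <= word_set
-- ===== Notes on version B (the rewrite author's own statement) =====
-- stated objective: simpler
-- what changed: Replaces A's loop that deletes each found letter from a shrinking set (then tests emptiness) with a single direct subset test of the lowered allowed-character set against the word's lowered character set.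
import Mathlib
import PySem

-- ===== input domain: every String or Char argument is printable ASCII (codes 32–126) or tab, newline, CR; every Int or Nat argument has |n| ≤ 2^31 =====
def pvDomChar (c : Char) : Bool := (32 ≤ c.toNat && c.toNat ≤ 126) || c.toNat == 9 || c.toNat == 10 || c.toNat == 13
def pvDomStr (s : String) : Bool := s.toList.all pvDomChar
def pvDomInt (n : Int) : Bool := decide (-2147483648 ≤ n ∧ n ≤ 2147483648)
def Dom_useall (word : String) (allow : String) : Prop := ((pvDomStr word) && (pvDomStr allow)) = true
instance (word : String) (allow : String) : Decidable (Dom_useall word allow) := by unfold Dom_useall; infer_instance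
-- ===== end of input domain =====

-- B replaces A's delete-from-a-shrinking-set loop with a direct subset test (objective: simpler).


-- ===== PORT A =====
def useall (word : String) (allow : String) : Bool :=
  let allowword : PySem.Set Char := PySem.Set.ofList (allow.toList.map PySem.Chars.lowerChar)
  let lowerword := PySem.Str.lower word
  let allowword := lowerword.toList.foldl
    (fun s i => if PySem.Set.contains s i then (PySem.Set.remove? s i).getD s else s) allowword
  if PySem.Set.len allowword = 0 then true else false

-- ===== PORT B =====
def useall_alt (word : String) (allow : String) : Bool :=
  let wordSet : PySem.Set Char := PySem.Set.ofList (PySem.Str.lower word).toList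
  let allowSet : PySem.Set Char := PySem.Set.ofList (allow.toList.map PySem.Chars.lowerChar)
  PySem.Set.issubset allowSet wordSet

-- ===== PRECONDITION & SPEC =====
def Spec_useall (word : String) (allow : String) (out : Bool) : Prop := out = useall_alt word allow
instance (word : String) (allow : String) (out : Bool) : Decidable (Spec_useall word allow out) := by unfold Spec_useall; infer_instance

-- ===== CLAIM (what is proved, stated in full; the proofs are below) =====
def Claim_equal_useall : Prop := ∀ (word : String) (allow : String), Dom_useall word allow → Spec_useall word allow (useall word allow)

-- ===== LEMMAS AND PROOFS =====

-- A's loop over the word's characters leaves exactly the allowed letters not occurring in the word.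
theorem useall_loop_filter (l : List Char) (s : List Char) :
    l.foldl (fun s i => if PySem.Set.contains s i then (PySem.Set.remove? s i).getD s else s) s
      = s.filter (fun x => !(l.contains x)) := by
  induction l generalizing s with
  | nil => simp
  | cons c l ih =>
    simp only [List.foldl_cons]
    by_cases hc : c ∈ s
    · rw [if_pos (by simpa [PySem.Set.contains_iff] using hc),
        PySem.Set.remove?_of_mem hc, Option.getD_some, ih]
      simp only [PySem.Set.discard, List.filter_filter]
      apply List.filter_congr
      intro x _
      by_cases hxc : x = c <;> simp [hxc]
    · rw [if_neg (by simpa [PySem.Set.contains_iff] using hc), ih]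
      apply List.filter_congr
      intro x hx
      have : x ≠ c := fun h => hc (h ▸ hx)
      simp [this]

-- ===== VERDICT (by name: the statement is the Claim_ definition above) =====
theorem useall_spec : Claim_equal_useall := by
  intro word allow _
  unfold Spec_useall useall useall_alt
  simp only []
  rw [useall_loop_filter]
  simp only [PySem.Set.len]
  have key : ((PySem.Set.ofList (allow.toList.map PySem.Chars.lowerChar)).filter
        (fun x => !((PySem.Str.lower word).toList.contains x))).length = 0 ↔
      PySem.Set.issubset (PySem.Set.ofList (allow.toList.map PySem.Chars.lowerChar))
        (PySem.Set.ofList (PySem.Str.lower word).toList) = true := by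
    rw [List.length_eq_zero_iff, List.filter_eq_nil_iff, PySem.Set.issubset_iff]
    simp [PySem.Set.mem_ofList]
  split_ifs with h
  · exact (key.mp (by exact_mod_cast h)).symm
  · cases hS : PySem.Set.issubset (PySem.Set.ofList (allow.toList.map PySem.Chars.lowerChar))
        (PySem.Set.ofList (PySem.Str.lower word).toList) with
    | true => exact absurd (by exact_mod_cast key.mpr hS) h
    | false => rfl
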